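-- pv_equiv track=rewrite | github.com/mohammadi-milad-mim/Competitive-Programming | UICPC/21/nwerc2020all/flightcollision/generators/anti-float-2.py | has_triple
-- ===== SOURCE A (Python) =====
-- def has_triple(w):
--     n = len(w)
--     for i in range(n):
--         for j in range(i):
--             for k in range(j):
--                 if (w[j]-w[i])*(k-j) == (w[k]-w[j])*(j-i):
--                     return True
--     return False
-- ===== SOURCE B (Python) =====
-- def _gcd(a, b):
--     while b:
--         a, b = b, a % b
--     return a
--
-- def _slope(dy, dx):
--     g = _gcd(abs(dy), dx)
--     return (dy // g, dx // g)
--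
-- def has_triple(w):
--     n = len(w)
--     for i in range(n):
--         slopes = [_slope(w[j] - w[i], j - i) for j in range(i + 1, n)]
--         if len(set(slopes)) < len(slopes):
--             return True
--     return False
-- ===== Notes on version B (the rewrite author's own statement) =====
-- stated objective: faster
-- what changed: replaced the triple nested scan over all index triples by a per-anchor pass that normalises each later point's slope to the anchor by a hand-rolled gcd and detects a collinear triple as a duplicate in the slope set
import Mathlib
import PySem

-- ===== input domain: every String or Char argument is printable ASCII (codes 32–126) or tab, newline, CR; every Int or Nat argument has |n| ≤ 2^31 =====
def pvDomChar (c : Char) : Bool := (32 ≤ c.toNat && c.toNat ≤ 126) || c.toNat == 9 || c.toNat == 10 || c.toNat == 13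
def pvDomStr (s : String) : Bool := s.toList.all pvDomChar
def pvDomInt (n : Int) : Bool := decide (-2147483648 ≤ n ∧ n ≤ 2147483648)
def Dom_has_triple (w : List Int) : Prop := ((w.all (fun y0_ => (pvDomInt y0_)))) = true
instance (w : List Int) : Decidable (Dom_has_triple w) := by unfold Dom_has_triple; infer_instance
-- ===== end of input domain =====

-- B replaces A's O(n^3) scan over all index triples by a per-anchor O(n^2) pass that
-- detects a duplicate among gcd-normalised slopes to the anchor.

-- ===== PORT A =====
def has_triple (w : List Int) : Bool :=
  (List.range w.length).any fun i =>
    (List.range i).any fun j =>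
      (List.range j).any fun k =>
        (w.getD j 0 - w.getD i 0) * ((k : Int) - (j : Int)) ==
          (w.getD k 0 - w.getD j 0) * ((j : Int) - (i : Int))

-- ===== PORT B =====
-- _gcd(a, b): Euclid's loop; Python's call site passes nonnegative ints, so Nat is exact
def pvGcd (a b : Nat) : Nat :=
  if _h : b = 0 then a else pvGcd b (a % b)
termination_by b
decreasing_by exact Nat.mod_lt _ (Nat.pos_of_ne_zero _h)

-- _slope(dy, dx): dx > 0 at every call site, so abs(dy) = dy.natAbs, dx = dx.toNat and // = floordiv
def pvSlope (dy dx : Int) : Int × Int :=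
  let g : Int := (pvGcd dy.natAbs dx.toNat : Nat)
  (PySem.Int.floordiv dy g, PySem.Int.floordiv dx g)

def has_triple_alt (w : List Int) : Bool :=
  (List.range w.length).any fun i =>
    let slopes := (List.range' (i + 1) (w.length - (i + 1))).map
      (fun j => pvSlope (w.getD j 0 - w.getD i 0) ((j : Int) - (i : Int)))
    decide ((PySem.Set.ofList slopes).length < slopes.length)

-- ===== PRECONDITION & SPEC =====
def Spec_has_triple (w : List Int) (out : Bool) : Prop := out = has_triple_alt w
instance (w : List Int) (out : Bool) : Decidable (Spec_has_triple w out) := by unfold Spec_has_triple; infer_instance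

-- ===== CLAIM (what is proved, stated in full; the proofs are below) =====
def Claim_equal_has_triple : Prop := ∀ (w : List Int), Dom_has_triple w → Spec_has_triple w (has_triple w)

-- ===== LEMMAS AND PROOFS =====

-- the hand-rolled Euclid loop is Nat.gcd with swapped arguments
theorem pvGcd_eq (a b : Nat) : pvGcd a b = Nat.gcd b a := by
  fun_induction pvGcd a b with
  | case1 h => simp_all
  | case2 a b h ih => rw [ih]; exact (Nat.gcd_rec b a).symm

-- for a positive denominator the normalised slope is exactly (num, den) of the rational dy/dx
theorem pvSlope_eq_num_den (dy dx : Int) (h : 0 < dx) :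
    pvSlope dy dx = ((Rat.divInt dy dx).num, ((Rat.divInt dy dx).den : Int)) := by
  have hgne : Int.gcd dx dy ≠ 0 := by
    simp only [ne_eq, Int.gcd_eq_zero_iff, not_and_or]
    left; omega
  have hg : (0 : Int) < ((Int.gcd dx dy : Nat) : Int) := by
    exact_mod_cast Nat.pos_of_ne_zero hgne
  have hgcd : pvGcd dy.natAbs dx.toNat = Int.gcd dx dy := by
    rw [pvGcd_eq]
    unfold Int.gcd
    congr 1
    omega
  unfold pvSlope
  simp only [hgcd, Prod.mk.injEq]
  refine ⟨?_, ?_⟩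
  · rw [PySem.Int.floordiv_eq_ediv_of_pos hg, Rat.num_divInt,
      Int.sign_eq_one_of_pos h, Int.one_mul]
  · rw [PySem.Int.floordiv_eq_ediv_of_pos hg, Rat.den_divInt,
      if_neg (by omega : dx ≠ 0)]
    rw [Int.natCast_ediv]
    congr 1
    omega

-- two normalised slopes with positive denominators coincide iff the cross products do
theorem pvSlope_eq_iff (dy1 dx1 dy2 dx2 : Int) (h1 : 0 < dx1) (h2 : 0 < dx2) :
    pvSlope dy1 dx1 = pvSlope dy2 dx2 ↔ dy1 * dx2 = dy2 * dx1 := by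
  rw [pvSlope_eq_num_den dy1 dx1 h1, pvSlope_eq_num_den dy2 dx2 h2,
    ← Rat.divInt_eq_divInt_iff (by omega : dx1 ≠ 0) (by omega : dx2 ≠ 0), Prod.mk.injEq]
  constructor
  · intro h
    exact Rat.ext h.1 (by exact_mod_cast h.2)
  · intro h
    exact ⟨by rw [h], by rw [h]⟩

-- len(set(l)) < len(l) iff l has a duplicate
theorem set_lt_iff_not_nodup {α : Type} [BEq α] [LawfulBEq α] (l : List α) :
    ((PySem.Set.ofList l).length < l.length) ↔ ¬ l.Nodup := by
  induction l with
  | nil => simp [PySem.Set.ofList_nil]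
  | cons x xs ih =>
    rw [PySem.Set.ofList_cons]
    by_cases hx : x ∈ xs
    · have hx' : x ∈ PySem.Set.ofList xs := (PySem.Set.mem_ofList xs x).2 hx
      have hlt : ((PySem.Set.ofList xs).discard x).length < (PySem.Set.ofList xs).length := by
        unfold PySem.Set.discard
        apply List.length_filter_lt_length_iff_exists.2
        exact ⟨x, hx', by simp⟩
      have hle := PySem.Set.length_ofList_le (xs := xs)
      simp only [List.length_cons, List.nodup_cons]
      constructor
      · intro _ hc; exact hc.1 hx
      · intro _; omega
    · have hd : (PySem.Set.ofList xs).discard x = PySem.Set.ofList xs := by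
        unfold PySem.Set.discard
        apply List.filter_eq_self.2
        intro a ha
        have : a ∈ xs := (PySem.Set.mem_ofList xs a).1 ha
        have hax : a ≠ x := by rintro rfl; exact hx this
        simp [hax]
      rw [hd]
      simp only [List.length_cons, List.nodup_cons, Nat.add_lt_add_iff_right, ih]
      tauto

-- the collinearity predicate A searches for (indices k < j < i, i in range)
def HasColl (w : List Int) : Prop :=
  ∃ i j k : ℕ, i < w.length ∧ j < i ∧ k < j ∧
    (w.getD j 0 - w.getD i 0) * ((k : Int) - (j : Int)) =
      (w.getD k 0 - w.getD j 0) * ((j : Int) - (i : Int))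

theorem has_triple_iff (w : List Int) : has_triple w = true ↔ HasColl w := by
  unfold has_triple HasColl
  simp only [List.any_eq_true, List.mem_range, beq_iff_eq]
  constructor
  · rintro ⟨i, hi, j, hj, k, hk, h⟩; exact ⟨i, j, k, hi, hj, hk, h⟩
  · rintro ⟨i, j, k, hi, hj, hk, h⟩; exact ⟨i, hi, j, hj, k, hk, h⟩

-- an anchored pair with equal normalised slopes yields A's triple
theorem coll_of_slopes (w : List Int) (i x y : ℕ) (hix : i < x) (hxy : x < y)
    (hy : y < w.length)
    (h : pvSlope (w.getD x 0 - w.getD i 0) ((x : Int) - (i : Int)) =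
         pvSlope (w.getD y 0 - w.getD i 0) ((y : Int) - (i : Int))) : HasColl w := by
  have cross := (pvSlope_eq_iff _ _ _ _ (by omega) (by omega)).1 h
  exact ⟨y, x, i, hy, hxy, hix, by linear_combination -cross⟩

theorem has_triple_alt_iff (w : List Int) : has_triple_alt w = true ↔ HasColl w := by
  unfold has_triple_alt
  simp only [List.any_eq_true, List.mem_range, decide_eq_true_eq]
  constructor
  · rintro ⟨i, hi, hdup⟩
    rw [set_lt_iff_not_nodup] at hdup
    have hnd : (List.range' (i + 1) (w.length - (i + 1))).Nodup := List.nodup_range' 1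
    rw [List.nodup_map_iff_inj_on hnd] at hdup
    push Not at hdup
    obtain ⟨x, hx, y, hy, hfxy, hxy⟩ := hdup
    rw [List.mem_range'_1] at hx hy
    rcases Nat.lt_or_ge x y with hlt | hge
    · exact coll_of_slopes w i x y (by omega) hlt (by omega) hfxy
    · exact coll_of_slopes w i y x (by omega) (by omega) (by omega) hfxy.symm
  · rintro ⟨i, j, k, hi, hj, hk, h⟩
    refine ⟨k, by omega, ?_⟩
    rw [set_lt_iff_not_nodup]
    intro hnodup
    have hnd : (List.range' (k + 1) (w.length - (k + 1))).Nodup := List.nodup_range' 1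
    rw [List.nodup_map_iff_inj_on hnd] at hnodup
    have hji : j = i := by
      apply hnodup j (by rw [List.mem_range'_1]; omega) i (by rw [List.mem_range'_1]; omega)
      apply (pvSlope_eq_iff _ _ _ _ (by omega) (by omega)).2
      linear_combination -h
    omega

-- ===== VERDICT (by name: the statement is the Claim_ definition above) =====
theorem has_triple_spec : Claim_equal_has_triple := by
  intro w _
  unfold Spec_has_triple
  rw [Bool.eq_iff_iff, has_triple_iff, has_triple_alt_iff]
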